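-- pv_equiv track=rewrite | github.com/pypi-data/pypi-mirror-195 | packages/isqopen/isqopen-1.0.tar.gz/isqopen-1.0/test/test.py | passcir
-- ===== SOURCE A (Python) =====
-- def passcir(s):
--     data = s.split('\n')
--     cnt = 0
--     ans = []
--     for qcis in data:
--         tmp = qcis.split(' ')
--         if len(tmp) == 3 and tmp[2] == '0.0':
--             tmp[2] = '{a['+str(cnt)+']}'
--             cnt += 1
--         ans.append(' '.join(tmp))
--     return '\n'.join(ans)
-- ===== SOURCE B (Python) =====
-- import re
--
-- _PAT = re.compile(r'^([^ \n]*) ([^ \n]*) 0\.0$', re.M)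
--
-- def passcir(s):
--     cnt = 0
--     def repl(m):
--         nonlocal cnt
--         out = m.group(1) + ' ' + m.group(2) + ' {a[' + str(cnt) + ']}'
--         cnt += 1
--         return out
--     return _PAT.sub(repl, s)
-- ===== Notes on version B (the rewrite author's own statement) =====
-- stated objective: idiomatic
-- what changed: B replaces A's split-into-lines / split-into-tokens / patch / rejoin loop with a single multiline regex substitution re.sub(r'^([^ \n]*) ([^ \n]*) 0\.0$', repl, s, flags=re.M) whose callback numbers the matches via a closure counter; no splitting, token lists or joining remain.
import Mathlib
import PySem

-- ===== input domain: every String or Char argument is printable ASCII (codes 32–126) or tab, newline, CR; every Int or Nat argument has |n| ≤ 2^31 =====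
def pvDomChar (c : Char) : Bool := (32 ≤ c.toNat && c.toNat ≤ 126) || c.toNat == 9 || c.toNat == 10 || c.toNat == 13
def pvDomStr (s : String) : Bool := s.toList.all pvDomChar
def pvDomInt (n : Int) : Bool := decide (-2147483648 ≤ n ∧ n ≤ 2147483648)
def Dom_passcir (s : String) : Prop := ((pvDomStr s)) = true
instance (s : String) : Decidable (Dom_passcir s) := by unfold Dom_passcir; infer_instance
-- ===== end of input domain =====

-- B replaces A's split-lines/split-tokens/rebuild/join loop by one multiline regex
-- substitution (pattern ^([^ \n]*) ([^ \n]*) 0\.0$, callback numbering matches with a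
-- closure counter); same cost, more idiomatic.

-- ===== PORT A =====
-- the parameter placeholder '{a['+str(cnt)+']}'
def pvRepl (k : Int) : List Char :=
  ('{' :: 'a' :: '[' :: []) ++ (PySem.Int.toStr k).toList ++ (']' :: '}' :: [])

-- one iteration of A's loop body: split on ' ', patch token 2 when the line is 'x y 0.0', rejoin
def pvStepA (st : Int × List (List Char)) (qcis : List Char) : Int × List (List Char) :=
  let tmp := PySem.Chars.splitOn qcis [' ']
  if tmp.length = 3 ∧ tmp.getD 2 [] = ['0', '.', '0'] then
    (st.1 + 1, st.2 ++ [PySem.Chars.join [' '] (tmp.set 2 (pvRepl st.1))])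
  else
    (st.1, st.2 ++ [PySem.Chars.join [' '] tmp])

def passcir (s : String) : String :=
  let data := PySem.Chars.splitOn s.toList ['\n']
  let res := data.foldl pvStepA ((0 : Int), ([] : List (List Char)))
  String.mk (PySem.Chars.join ['\n'] res.2)

-- ===== PORT B =====
-- Source B is `re.sub(r'^([^ \n]*) ([^ \n]*) 0\.0$', repl, s, flags=re.M)` with a counting
-- callback.  Lean has no regex engine, so the sub is ported by hand, exactly:
--  * pvTok is the character class [^ \n];
--  * pvTry matches the pattern at a line start.  The greedy runs ([^ \n]*) admit no
--    backtracking here (shortening a run exposes a [^ \n] character where the pattern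
--    needs a literal ' '), so maximal-munch takeWhile/dropWhile is exact;
--  * pvTail is the literal tail `0\.0$` of the pattern ($ under re.M = end of string
--    or immediately before a '\n');
--  * pvScan is re.sub's left-to-right scan: on a match, emit the callback's replacement
--    and resume at the match end; on failure the next position where ^ (re.M) can match
--    is just after the next '\n', so the text is copied verbatim through it.
def pvTok (c : Char) : Bool := c != ' ' && c != '\n'

def pvTail (m : List Char) : Option (List Char) :=
  match m with
  | a :: b :: c :: t4 =>
    if a = '0' ∧ b = '.' ∧ c = '0' ∧ (t4 = [] ∨ t4.headD ' ' = '\n') then some t4 else none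
  | _ => none

def pvTry (t : List Char) : Option (List Char × List Char × List Char) :=
  if ((t.dropWhile pvTok).headD '\n') = ' ' then
    if ((((t.dropWhile pvTok).tail).dropWhile pvTok).headD '\n') = ' ' then
      (pvTail ((((t.dropWhile pvTok).tail).dropWhile pvTok).tail)).map
        (fun rest => (t.takeWhile pvTok, ((t.dropWhile pvTok).tail).takeWhile pvTok, rest))
    else none
  else none

-- the scan: fuel-based like the PySem string primitives (fuel = |t|+1 always suffices,
-- since each step consumes at least one character of t)
def pvScanF : Nat → List Char → Int → List Char
  | 0, t, _ => t
  | fuel + 1, t, cnt =>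
    match pvTry t with
    | some (g1, g2, rest) =>
      let out := g1 ++ ' ' :: g2 ++ ' ' :: '{' :: 'a' :: '[' ::
        ((PySem.Int.toStr cnt).toList ++ (']' :: '}' :: []))
      match rest with
      | [] => out
      | _ :: r => out ++ '\n' :: pvScanF fuel r (cnt + 1)
    | none =>
      match t.dropWhile (· != '\n') with
      | [] => t
      | _ :: r => t.takeWhile (· != '\n') ++ '\n' :: pvScanF fuel r cnt

def pvScan (t : List Char) (cnt : Int) : List Char := pvScanF (t.length + 1) t cnt

def passcir_alt (s : String) : String := String.mk (pvScan s.toList 0)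

-- ===== PRECONDITION & SPEC =====
def Spec_passcir (s : String) (out : String) : Prop := out = passcir_alt s
instance (s : String) (out : String) : Decidable (Spec_passcir s out) := by unfold Spec_passcir; infer_instance

-- ===== CLAIM (what is proved, stated in full; the proofs are below) =====
def Claim_equal_passcir : Prop := ∀ (s : String), Dom_passcir s → Spec_passcir s (passcir s)

-- ===== LEMMAS AND PROOFS =====

-- characterisation of the pattern tail (the literal `0\.0$` part of the pattern)
theorem pvTail_eq_some (m rest : List Char) :
    pvTail m = some rest ↔
      m = '0' :: '.' :: '0' :: rest ∧ (rest = [] ∨ ∃ r, rest = '\n' :: r) := by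
  rcases m with _ | ⟨a, m⟩
  · simp [pvTail]
  rcases m with _ | ⟨b, m⟩
  · simp [pvTail]
  rcases m with _ | ⟨c, t4⟩
  · simp [pvTail]
  rw [show pvTail (a :: b :: c :: t4) =
    (if a = '0' ∧ b = '.' ∧ c = '0' ∧ (t4 = [] ∨ t4.headD ' ' = '\n') then some t4 else none)
    from rfl]
  split_ifs with h
  · obtain ⟨ha, hb, hc, ht⟩ := h
    subst ha; subst hb; subst hc
    have ht' : t4 = [] ∨ ∃ r, t4 = '\n' :: r := by
      rcases t4 with _ | ⟨d, r⟩
      · exact Or.inl rfl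
      · rcases ht with ht | ht
        · simp at ht
        · simp at ht; exact Or.inr ⟨r, by rw [ht]⟩
    constructor
    · intro hsome
      injection hsome with hsome
      subst hsome
      exact ⟨rfl, ht'⟩
    · rintro ⟨heq, -⟩
      simp only [List.cons.injEq, true_and] at heq
      rw [heq]
  · constructor
    · intro hsome; simp at hsome
    · rintro ⟨heq, hr⟩
      simp only [List.cons.injEq] at heq
      obtain ⟨ha, hb, hc, ht4⟩ := heq
      exfalso
      apply h
      refine ⟨ha, hb, hc, ?_⟩
      rcases hr with hr | ⟨r, hr⟩
      · exact Or.inl (by rw [ht4, hr])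
      · right; rw [ht4, hr]; rfl


-- clean structural model of Python's str.split(c) for a single-character separator
def mySplit (c : Char) : List Char → List (List Char)
  | [] => [[]]
  | x :: l =>
    if x = c then [] :: mySplit c l
    else
      match mySplit c l with
      | [] => [[x]]
      | p :: ps => (x :: p) :: ps

theorem mySplit_ne_nil (c : Char) (l : List Char) : mySplit c l ≠ [] := by
  induction l with
  | nil => simp [mySplit]
  | cons x l ih =>
    simp only [mySplit]
    split_ifs with h
    · simp
    · cases hm : mySplit c l <;> simp

theorem intercalate_cc (sep a b : List Char) (l : List (List Char)) :
    sep.intercalate (a :: b :: l) = a ++ sep ++ sep.intercalate (b :: l) := by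
  simp [List.intercalate, List.intersperse]

theorem join_cc (c : Char) (a b : List Char) (l : List (List Char)) :
    PySem.Chars.join [c] (a :: b :: l) = a ++ c :: PySem.Chars.join [c] (b :: l) := by
  simp only [PySem.Chars.join]; rw [intercalate_cc]; simp

theorem join_one (c : Char) (a : List Char) :
    PySem.Chars.join [c] [a] = a := by
  simp [PySem.Chars.join, List.intercalate]

theorem join3 (a b c : List Char) :
    PySem.Chars.join [' '] [a, b, c] = a ++ ' ' :: (b ++ ' ' :: c) := by
  rw [join_cc, join_cc, join_one]

theorem join_mySplit (c : Char) (l : List Char) :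
    PySem.Chars.join [c] (mySplit c l) = l := by
  induction l with
  | nil => simp [mySplit, PySem.Chars.join, List.intercalate]
  | cons x l ih =>
    simp only [mySplit]
    split_ifs with h
    · subst h
      cases hm : mySplit x l with
      | nil => exact absurd hm (mySplit_ne_nil x l)
      | cons p ps =>
        rw [hm] at ih
        rw [join_cc]
        simpa using ih
    · cases hm : mySplit c l with
      | nil => exact absurd hm (mySplit_ne_nil c l)
      | cons p ps =>
        rw [hm] at ih
        cases ps with
        | nil => rw [join_one] at ih ⊢; rw [ih]
        | cons q qs =>
          rw [join_cc] at ih ⊢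
          simp only [List.cons_append] at ih ⊢
          rw [← ih]

theorem not_mem_mySplit (c : Char) (l : List Char) :
    ∀ p ∈ mySplit c l, c ∉ p := by
  induction l with
  | nil => simp [mySplit]
  | cons x l ih =>
    simp only [mySplit]
    split_ifs with h
    · intro p hp
      cases hp with
      | head => simp
      | tail _ hp => exact ih p hp
    · cases hm : mySplit c l with
      | nil => exact absurd hm (mySplit_ne_nil c l)
      | cons q qs =>
        rw [hm] at ih
        intro p hp
        cases hp with
        | head =>
          intro hc
          cases hc with
          | head => exact h rfl
          | tail _ hc => exact ih q (by simp) hc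
        | tail _ hp => exact ih p (List.mem_cons_of_mem q hp)

theorem mem_mySplit_subset (c : Char) (l : List Char) :
    ∀ p ∈ mySplit c l, ∀ x ∈ p, x ∈ l := by
  induction l with
  | nil =>
    intro p hp x hx
    simp [mySplit] at hp
    subst hp; simp at hx
  | cons y l ih =>
    simp only [mySplit]
    split_ifs with h
    · intro p hp x hx
      cases hp with
      | head => simp at hx
      | tail _ hp => exact List.mem_cons_of_mem _ (ih p hp x hx)
    · cases hm : mySplit c l with
      | nil => exact absurd hm (mySplit_ne_nil c l)
      | cons q qs =>
        rw [hm] at ih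
        intro p hp x hx
        cases hp with
        | head =>
          rcases List.mem_cons.mp hx with rfl | hx
          · exact List.mem_cons_self
          · exact List.mem_cons_of_mem _ (ih q (by simp) x hx)
        | tail _ hp => exact List.mem_cons_of_mem _ (ih p (List.mem_cons_of_mem q hp) x hx)

theorem splitOn_go_eq (c : Char) (l : List Char) :
    ∀ (fuel : Nat) (cur : List Char) (acc : List (List Char)), l.length ≤ fuel →
      PySem.Chars.splitOn.go [c] fuel l cur acc =
        acc.reverse ++
          (match mySplit c l with
           | [] => []
           | p :: ps => (cur.reverse ++ p) :: ps) := by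
  induction l with
  | nil =>
    intro fuel cur acc _
    cases fuel <;> simp [PySem.Chars.splitOn.go, mySplit]
  | cons x l ih =>
    intro fuel cur acc hf
    simp only [List.length_cons] at hf
    cases fuel with
    | zero => omega
    | succ f =>
      by_cases h : x = c
      · subst h
        have hpre : [x].isPrefixOf (x :: l) = true := by simp [List.isPrefixOf]
        rw [PySem.Chars.splitOn.go]
        simp only [hpre, if_true, List.length_cons, List.length_nil, Nat.zero_add,
          List.drop_succ_cons, List.drop_zero]
        rw [ih f [] (cur.reverse :: acc) (by omega)]
        cases hm : mySplit x l with
        | nil => exact absurd hm (mySplit_ne_nil x l)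
        | cons p ps => simp [mySplit, hm]
      · have hpre : [c].isPrefixOf (x :: l) = false := by
          simp [List.isPrefixOf]
          exact fun hc => h hc.symm
        rw [PySem.Chars.splitOn.go]
        simp only [hpre, Bool.false_eq_true, if_false]
        rw [ih f (x :: cur) acc (by omega)]
        cases hm : mySplit c l with
        | nil => exact absurd hm (mySplit_ne_nil c l)
        | cons p ps => simp [mySplit, h, hm]

theorem splitOn_eq_mySplit (c : Char) (l : List Char) :
    PySem.Chars.splitOn l [c] = mySplit c l := by
  rw [PySem.Chars.splitOn, splitOn_go_eq c l (l.length + 1) [] [] (by omega)]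
  cases hm : mySplit c l with
  | nil => exact absurd hm (mySplit_ne_nil c l)
  | cons p ps => simp

-- maximal-munch over a token-free prefix
theorem takeWhile_append_all {p : Char → Bool} (a b : List Char) (h : ∀ x ∈ a, p x = true) :
    (a ++ b).takeWhile p = a ++ b.takeWhile p := by
  induction a with
  | nil => simp
  | cons x a ih =>
    simp only [List.cons_append, List.takeWhile_cons]
    rw [h x (by simp), ih (fun y hy => h y (by simp [hy]))]
    simp

theorem dropWhile_append_all {p : Char → Bool} (a b : List Char) (h : ∀ x ∈ a, p x = true) :
    (a ++ b).dropWhile p = b.dropWhile p := by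
  induction a with
  | nil => simp
  | cons x a ih =>
    simp only [List.cons_append, List.dropWhile_cons]
    rw [h x (by simp), ih (fun y hy => h y (by simp [hy]))]
    simp

-- the hit condition of A's loop body
def pvHit (l : List Char) : Bool :=
  (mySplit ' ' l).length == 3 && (mySplit ' ' l).getD 2 [] == ['0', '.', '0']

-- every token is made of pattern-class [^ \n] characters when the line is '\n'-free
theorem tok_of_mySplit (l p : List Char) (hl : ('\n' : Char) ∉ l) (hp : p ∈ mySplit ' ' l) :
    ∀ x ∈ p, pvTok x = true := by
  intro x hx
  have hxs : x ≠ ' ' := fun he => not_mem_mySplit ' ' l p hp (he ▸ hx)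
  have hxn : x ≠ '\n' := fun he => hl (he ▸ mem_mySplit_subset ' ' l p hp x hx)
  simp [pvTok, hxs, hxn]

theorem hit_decomp (l : List Char) (h : pvHit l = true) :
    ∃ s0 s1, mySplit ' ' l = [s0, s1, ['0', '.', '0']] := by
  simp only [pvHit, Bool.and_eq_true, beq_iff_eq] at h
  obtain ⟨h3, h2⟩ := h
  obtain ⟨a, b, c, hm⟩ := List.length_eq_three.mp h3
  refine ⟨a, b, ?_⟩
  rw [hm] at h2 ⊢
  simp at h2
  rw [h2]

-- the pattern tail cannot match a non-"0.0" final token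
theorem pvTail_none (u z : List Char) (hu : ∀ x ∈ u, pvTok x = true)
    (hz : z = [] ∨ z.headD ' ' = '\n' ∨ z.headD '\n' = ' ')
    (hne : ¬ (u = ['0', '.', '0'] ∧ (z = [] ∨ ∃ r, z = '\n' :: r))) :
    pvTail (u ++ z) = none := by
  rcases hp : pvTail (u ++ z) with - | rest
  · rfl
  exfalso
  obtain ⟨heq, hr⟩ := (pvTail_eq_some _ _).mp hp
  rcases u with - | ⟨a, u⟩
  · simp only [List.nil_append] at heq
    rcases hz with rfl | hz | hz
    · simp at heq
    · rw [heq] at hz; simp at hz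
    · rw [heq] at hz; simp at hz
  rcases u with - | ⟨b, u⟩
  · simp only [List.cons_append, List.nil_append, List.cons.injEq] at heq
    obtain ⟨-, heq⟩ := heq
    rcases hz with rfl | hz | hz
    · simp at heq
    · rw [heq] at hz; simp at hz
    · rw [heq] at hz; simp at hz
  rcases u with - | ⟨c, u⟩
  · simp only [List.cons_append, List.nil_append, List.cons.injEq] at heq
    obtain ⟨-, -, heq⟩ := heq
    rcases hz with rfl | hz | hz
    · simp at heq
    · rw [heq] at hz; simp at hz
    · rw [heq] at hz; simp at hz
  · simp only [List.cons_append, List.cons.injEq] at heq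
    obtain ⟨ha, hb, hc, heq⟩ := heq
    rcases u with - | ⟨d, u⟩
    · simp only [List.nil_append] at heq
      apply hne
      subst ha; subst hb; subst hc
      exact ⟨rfl, by rw [heq]; exact hr⟩
    · have hd2 : pvTok d = true := hu d (by simp)
      simp only [List.cons_append] at heq
      rcases hr with hr | ⟨r, hr⟩
      · rw [hr] at heq; simp at heq
      · rw [hr] at heq
        simp only [List.cons.injEq] at heq
        have : d = '\n' := heq.1
        rw [this] at hd2
        simp [pvTok] at hd2

-- B's regex matches at a line start exactly A's hit lines (l is '\n'-free; what follows
-- l is empty or starts with '\n')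
theorem pvTry_hit (s0 s1 rest : List Char)
    (h0 : ∀ x ∈ s0, pvTok x = true) (h1 : ∀ x ∈ s1, pvTok x = true)
    (hrest : rest = [] ∨ ∃ r, rest = '\n' :: r) :
    pvTry (s0 ++ ' ' :: (s1 ++ ' ' :: '0' :: '.' :: '0' :: rest)) = some (s0, s1, rest) := by
  have hsp : pvTok ' ' = false := by decide
  have e1d : (s0 ++ ' ' :: (s1 ++ ' ' :: '0' :: '.' :: '0' :: rest)).dropWhile pvTok
      = ' ' :: (s1 ++ ' ' :: '0' :: '.' :: '0' :: rest) := by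
    rw [dropWhile_append_all _ _ h0]
    simp [List.dropWhile_cons, hsp]
  have e1t : (s0 ++ ' ' :: (s1 ++ ' ' :: '0' :: '.' :: '0' :: rest)).takeWhile pvTok = s0 := by
    rw [takeWhile_append_all _ _ h0]
    simp [List.takeWhile_cons, hsp]
  have e2d : (s1 ++ ' ' :: '0' :: '.' :: '0' :: rest).dropWhile pvTok
      = ' ' :: ('0' :: '.' :: '0' :: rest) := by
    rw [dropWhile_append_all _ _ h1]
    simp [List.dropWhile_cons, hsp]
  have e2t : (s1 ++ ' ' :: '0' :: '.' :: '0' :: rest).takeWhile pvTok = s1 := by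
    rw [takeWhile_append_all _ _ h1]
    simp [List.takeWhile_cons, hsp]
  have e3 : pvTail ('0' :: '.' :: '0' :: rest) = some rest :=
    (pvTail_eq_some _ _).mpr ⟨rfl, hrest⟩
  unfold pvTry
  rw [e1d]
  simp only [List.headD_cons, List.tail_cons]
  rw [e2d]
  simp only [List.headD_cons, List.tail_cons]
  rw [e3]
  simp [e1t, e2t]

theorem pvTry_miss (l rest : List Char) (hl : ('\n' : Char) ∉ l)
    (hrest : rest = [] ∨ ∃ r, rest = '\n' :: r) (hmiss : pvHit l = false) :
    pvTry (l ++ rest) = none := by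
  have hsp : pvTok ' ' = false := by decide
  have hrd : rest.dropWhile pvTok = rest := by
    rcases hrest with rfl | ⟨r, rfl⟩
    · simp
    · simp [List.dropWhile_cons, pvTok]
  have hrh : rest.headD '\n' ≠ ' ' := by
    rcases hrest with rfl | ⟨r, rfl⟩ <;> simp
  have hjoin := join_mySplit ' ' l
  rcases hm : mySplit ' ' l with - | ⟨t0, T1⟩
  · exact absurd hm (mySplit_ne_nil ' ' l)
  · have h0 := tok_of_mySplit l t0 hl (by rw [hm]; simp)
    rcases T1 with - | ⟨t1, T2⟩
    · have hl0 : l = t0 := by rw [← hjoin, hm, join_one]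
      unfold pvTry
      have e1 : (l ++ rest).dropWhile pvTok = rest := by
        rw [hl0, dropWhile_append_all _ _ h0, hrd]
      rw [e1, if_neg hrh]
    · have h1 := tok_of_mySplit l t1 hl (by rw [hm]; simp)
      rcases T2 with - | ⟨t2tok, T3⟩
      · have hl0 : l = t0 ++ ' ' :: t1 := by rw [← hjoin, hm, join_cc, join_one]
        unfold pvTry
        have e1 : (l ++ rest).dropWhile pvTok = ' ' :: (t1 ++ rest) := by
          rw [hl0, show (t0 ++ ' ' :: t1) ++ rest = t0 ++ ' ' :: (t1 ++ rest) by simp,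
            dropWhile_append_all _ _ h0]
          simp [List.dropWhile_cons, hsp]
        have e2 : (t1 ++ rest).dropWhile pvTok = rest := by
          rw [dropWhile_append_all _ _ h1, hrd]
        rw [e1]
        simp [e2]
        intro hc
        rcases hrest with rfl | ⟨r, rfl⟩ <;> simp at hc
      · have h2 := tok_of_mySplit l t2tok hl (by rw [hm]; simp)
        rcases T3 with - | ⟨t3, T4⟩
        · have hl0 : l = t0 ++ ' ' :: (t1 ++ ' ' :: t2tok) := by
            rw [← hjoin, hm, join_cc, join_cc, join_one]
          have hne : ¬ (t2tok = ['0', '.', '0']) := by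
            intro he
            simp [pvHit, hm, he] at hmiss
          have e1 : (l ++ rest).dropWhile pvTok = ' ' :: (t1 ++ ' ' :: (t2tok ++ rest)) := by
            rw [hl0, show (t0 ++ ' ' :: (t1 ++ ' ' :: t2tok)) ++ rest
                = t0 ++ ' ' :: (t1 ++ ' ' :: (t2tok ++ rest)) by simp,
              dropWhile_append_all _ _ h0]
            simp [List.dropWhile_cons, hsp]
          have e2 : (t1 ++ ' ' :: (t2tok ++ rest)).dropWhile pvTok = ' ' :: (t2tok ++ rest) := by
            rw [dropWhile_append_all _ _ h1]
            simp [List.dropWhile_cons, hsp]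
          have e3 : pvTail (t2tok ++ rest) = none := by
            apply pvTail_none _ _ h2
            · rcases hrest with rfl | ⟨r, rfl⟩
              · exact Or.inl rfl
              · exact Or.inr (Or.inl (by simp))
            · rintro ⟨he, -⟩
              exact hne he
          unfold pvTry
          rw [e1]
          simp [e2, e3]
        · have hl0 : l = t0 ++ ' ' :: (t1 ++ ' ' :: (t2tok ++ ' ' ::
              PySem.Chars.join [' '] (t3 :: T4))) := by
            rw [← hjoin, hm, join_cc, join_cc, join_cc]
          have e1 : (l ++ rest).dropWhile pvTok
              = ' ' :: (t1 ++ ' ' :: (t2tok ++ ' ' ::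
                  (PySem.Chars.join [' '] (t3 :: T4) ++ rest))) := by
            rw [hl0, show (t0 ++ ' ' :: (t1 ++ ' ' :: (t2tok ++ ' ' ::
                  PySem.Chars.join [' '] (t3 :: T4)))) ++ rest
                = t0 ++ ' ' :: (t1 ++ ' ' :: (t2tok ++ ' ' ::
                  (PySem.Chars.join [' '] (t3 :: T4) ++ rest))) by simp,
              dropWhile_append_all _ _ h0]
            simp [List.dropWhile_cons, hsp]
          have e2 : (t1 ++ ' ' :: (t2tok ++ ' ' ::
                (PySem.Chars.join [' '] (t3 :: T4) ++ rest))).dropWhile pvTok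
              = ' ' :: (t2tok ++ ' ' :: (PySem.Chars.join [' '] (t3 :: T4) ++ rest)) := by
            rw [dropWhile_append_all _ _ h1]
            simp [List.dropWhile_cons, hsp]
          have e3 : pvTail (t2tok ++ ' ' ::
                (PySem.Chars.join [' '] (t3 :: T4) ++ rest)) = none := by
            apply pvTail_none _ _ h2
            · exact Or.inr (Or.inr (by simp))
            · rintro ⟨-, hz⟩
              rcases hz with hz | ⟨r, hz⟩ <;> simp at hz
          unfold pvTry
          rw [e1]
          simp [e2, e3]

-- A's output lines with the running counter threaded through
def pvMapA (c : Int) : List (List Char) → List (List Char)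
  | [] => []
  | l :: ls =>
    if pvHit l then
      PySem.Chars.join [' '] ((mySplit ' ' l).set 2 (pvRepl c)) :: pvMapA (c + 1) ls
    else l :: pvMapA c ls

theorem foldA (L : List (List Char)) :
    ∀ (c : Int) (acc : List (List Char)),
      (L.foldl pvStepA (c, acc)).2 = acc ++ pvMapA c L := by
  induction L with
  | nil => simp [pvMapA]
  | cons l ls ih =>
    intro c acc
    simp only [List.foldl_cons]
    by_cases h : pvHit l = true
    · have h' : (mySplit ' ' l).length = 3 ∧
          (mySplit ' ' l).getD 2 [] = ['0', '.', '0'] := by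
        simpa [pvHit] using h
      have hstep : pvStepA (c, acc) l =
          (c + 1, acc ++ [PySem.Chars.join [' '] ((mySplit ' ' l).set 2 (pvRepl c))]) := by
        simp only [pvStepA, splitOn_eq_mySplit]
        rw [if_pos h']
      rw [hstep, ih, pvMapA, if_pos h]
      simp
    · have h' : ¬ ((mySplit ' ' l).length = 3 ∧
          (mySplit ' ' l).getD 2 [] = ['0', '.', '0']) := by
        intro hc
        exact h (by simpa [pvHit] using hc)
      have hstep : pvStepA (c, acc) l = (c, acc ++ [l]) := by
        simp only [pvStepA, splitOn_eq_mySplit]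
        rw [if_neg h', join_mySplit]
      rw [hstep, ih, pvMapA, if_neg h]
      simp

theorem scan_lines (L : List (List Char)) :
    ∀ (fuel : Nat) (cnt : Int), (∀ l ∈ L, ('\n' : Char) ∉ l) → L ≠ [] →
      (PySem.Chars.join ['\n'] L).length < fuel →
      pvScanF fuel (PySem.Chars.join ['\n'] L) cnt = PySem.Chars.join ['\n'] (pvMapA cnt L) := by
  induction L with
  | nil => intro fuel cnt _ h _; exact absurd rfl h
  | cons l ls ih =>
    intro fuel cnt hL _hne hfuel
    rcases fuel with - | f
    · omega
    simp only [pvScanF]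
    have hlnl : ('\n' : Char) ∉ l := hL l (by simp)
    cases ls with
    | nil =>
      rw [join_one]
      by_cases h : pvHit l = true
      · obtain ⟨s0, s1, hm⟩ := hit_decomp l h
        have h0 := tok_of_mySplit l s0 hlnl (by rw [hm]; simp)
        have h1 := tok_of_mySplit l s1 hlnl (by rw [hm]; simp)
        have hx := join_mySplit ' ' l
        rw [hm, join3] at hx
        have hl0 := hx.symm
        have htry : pvTry l = some (s0, s1, []) := by
          have hh := pvTry_hit s0 s1 [] h0 h1 (Or.inl rfl)
          rw [hl0]
          exact hh
        rw [htry]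
        simp [pvMapA, h, hm, join_one, join3, pvRepl]
      · have hf : pvHit l = false := by simpa using h
        have htry : pvTry l = none := by
          have hh := pvTry_miss l [] hlnl (Or.inl rfl) hf
          simpa using hh
        have hdw : l.dropWhile (· != '\n') = [] := by
          rw [List.dropWhile_eq_nil_iff]
          intro x hx
          simp
          exact fun he => hlnl (he ▸ hx)
        rw [htry, hdw]
        simp [pvMapA, hf, join_one]
    | cons l2 ls' =>
      have htail : ∀ p ∈ l2 :: ls', ('\n' : Char) ∉ p := fun p hp =>
        hL p (List.mem_cons_of_mem _ hp)
      have hmap : ∀ c : Int, ∃ m ms, pvMapA c (l2 :: ls') = m :: ms := by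
        intro c
        by_cases hh : pvHit l2 = true
        · exact ⟨PySem.Chars.join [' '] ((mySplit ' ' l2).set 2 (pvRepl c)), pvMapA (c + 1) ls',
            by simp [pvMapA, hh]⟩
        · exact ⟨l2, pvMapA c ls', by simp [pvMapA, hh]⟩
      rw [join_cc]
      by_cases h : pvHit l = true
      · obtain ⟨s0, s1, hm⟩ := hit_decomp l h
        have h0 := tok_of_mySplit l s0 hlnl (by rw [hm]; simp)
        have h1 := tok_of_mySplit l s1 hlnl (by rw [hm]; simp)
        have hx := join_mySplit ' ' l
        rw [hm, join3] at hx
        have hl0 := hx.symm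
        have htry : pvTry (l ++ '\n' :: PySem.Chars.join ['\n'] (l2 :: ls'))
            = some (s0, s1, '\n' :: PySem.Chars.join ['\n'] (l2 :: ls')) := by
          have hh := pvTry_hit s0 s1 ('\n' :: PySem.Chars.join ['\n'] (l2 :: ls')) h0 h1
            (Or.inr ⟨_, rfl⟩)
          rw [hl0, show (s0 ++ ' ' :: (s1 ++ ' ' :: ['0', '.', '0'])) ++
              '\n' :: PySem.Chars.join ['\n'] (l2 :: ls')
              = s0 ++ ' ' :: (s1 ++ ' ' :: '0' :: '.' :: '0' ::
                  ('\n' :: PySem.Chars.join ['\n'] (l2 :: ls'))) by simp]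
          exact hh
        rw [htry]
        dsimp only
        have hflen : (PySem.Chars.join ['\n'] (l2 :: ls')).length < f := by
          rw [join_cc] at hfuel
          simp at hfuel ⊢
          omega
        rw [ih f (cnt + 1) htail (by simp) hflen]
        obtain ⟨m, ms, hmm⟩ := hmap (cnt + 1)
        have hcons : pvMapA cnt (l :: l2 :: ls')
            = PySem.Chars.join [' '] ((mySplit ' ' l).set 2 (pvRepl cnt))
              :: pvMapA (cnt + 1) (l2 :: ls') := by
          simp [pvMapA, h]
        rw [hcons, hmm, join_cc, ← hmm, hm]
        simp [join3, pvRepl]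
      · have hf : pvHit l = false := by simpa using h
        have htry := pvTry_miss l ('\n' :: PySem.Chars.join ['\n'] (l2 :: ls')) hlnl
          (Or.inr ⟨_, rfl⟩) hf
        have hnl : ∀ x ∈ l, (x != '\n') = true := by
          intro x hx
          simp
          exact fun he => hlnl (he ▸ hx)
        have hdw : (l ++ '\n' :: PySem.Chars.join ['\n'] (l2 :: ls')).dropWhile (· != '\n')
            = '\n' :: PySem.Chars.join ['\n'] (l2 :: ls') := by
          rw [dropWhile_append_all _ _ hnl]
          simp
        have htw : (l ++ '\n' :: PySem.Chars.join ['\n'] (l2 :: ls')).takeWhile (· != '\n')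
            = l := by
          rw [takeWhile_append_all _ _ hnl]
          simp
        rw [htry, hdw]
        dsimp only
        rw [htw]
        have hflen : (PySem.Chars.join ['\n'] (l2 :: ls')).length < f := by
          rw [join_cc] at hfuel
          simp at hfuel ⊢
          omega
        rw [ih f cnt htail (by simp) hflen]
        obtain ⟨m, ms, hmm⟩ := hmap cnt
        have hcons : pvMapA cnt (l :: l2 :: ls') = l :: pvMapA cnt (l2 :: ls') := by
          simp [pvMapA, hf]
        rw [hcons, hmm, join_cc, ← hmm]

-- ===== VERDICT (by name: the statement is the Claim_ definition above) =====
theorem passcir_spec : Claim_equal_passcir := by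
  intro s _
  unfold Spec_passcir passcir passcir_alt
  dsimp only
  rw [splitOn_eq_mySplit, foldA]
  have hj := join_mySplit '\n' s.toList
  have hs := scan_lines (mySplit '\n' s.toList) (s.toList.length + 1) 0
    (fun l hl => not_mem_mySplit '\n' s.toList l hl) (mySplit_ne_nil '\n' s.toList)
    (by rw [hj]; omega)
  rw [hj] at hs
  have hlen : s.toList.length = s.length := by simp
  show String.mk (PySem.Chars.join ['\n'] ([] ++ pvMapA 0 (mySplit '\n' s.toList)))
      = String.mk (pvScanF (s.toList.length + 1) s.toList 0)
  rw [hs]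
  simp
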